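-- pv_equiv track=rewrite | github.com/rocky-d/informatics | code/py/src/leetcode/done/until20240601/p2597.py | beautifulSubsets
-- ===== SOURCE A (Python) =====
-- from typing import List
--
-- def beautifulSubsets(nums: List[int], k: int) -> int:
--     subsets = [[]]
--     for num in nums:
--         k1, k2 = num - k, num + k
--         for i in range(len(subsets)):
--             subset = subsets[i]
--             if k1 not in subset and k2 not in subset:
--                 subsets.append(subset + [num])
--     return len(subsets) - 1
-- ===== SOURCE B (Python) =====
-- from typing import List
--
-- def beautifulSubsets(nums: List[int], k: int) -> int:
--     # alternative: recursive include/exclude counting (no subset lists materialized)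
--     def count(i, chosen):
--         if i == len(nums):
--             return 1
--         total = count(i + 1, chosen)
--         if nums[i] - k not in chosen and nums[i] + k not in chosen:
--             total = total + count(i + 1, chosen + (nums[i],))
--         return total
--     return count(0, ()) - 1
-- ===== Notes on version B (the rewrite author's own statement) =====
-- stated objective: alternative
-- what changed: A materializes every beautiful subset in a growing flat list via a nested index loop and returns its length; B counts subsets directly with an include/exclude recursion over the indices, building no subset list.
import Mathlib
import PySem

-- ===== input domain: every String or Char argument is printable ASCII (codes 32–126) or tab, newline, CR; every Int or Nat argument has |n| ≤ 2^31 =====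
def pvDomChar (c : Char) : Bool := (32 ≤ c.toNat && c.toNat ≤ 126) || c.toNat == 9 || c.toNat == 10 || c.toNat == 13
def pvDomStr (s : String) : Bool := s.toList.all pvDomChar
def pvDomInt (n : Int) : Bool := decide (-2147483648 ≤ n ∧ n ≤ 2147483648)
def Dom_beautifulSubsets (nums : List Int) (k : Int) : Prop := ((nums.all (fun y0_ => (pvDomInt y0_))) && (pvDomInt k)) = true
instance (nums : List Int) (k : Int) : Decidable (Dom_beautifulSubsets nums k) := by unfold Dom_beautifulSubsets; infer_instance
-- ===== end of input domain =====

-- B replaces A's explicit breadth-first materialization of every beautiful subset in a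
-- growing list with a direct recursive include/exclude count (alternative decomposition;
-- same exponential cost, no subset lists built).

-- ===== PORT A =====
-- inner 'for i in range(len(subsets))' loop of A (range length fixed before the loop)
def pvStepA (k : Int) (subsets : List (List Int)) (num : Int) : List (List Int) :=
  let k1 := num - k
  let k2 := num + k
  (PySem.List.pyRange 0 (subsets.length) 1).foldl
    (fun acc i =>
      let subset := PySem.List.pyGetD acc i []
      if !subset.contains k1 && !subset.contains k2 then acc ++ [subset ++ [num]] else acc)
    subsets

def beautifulSubsets (nums : List Int) (k : Int) : Int :=
  let subsets := nums.foldl (fun subsets num => pvStepA k subsets num) [[]]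
  (subsets.length : Int) - 1

-- ===== PORT B =====
-- count(i, chosen) of B, recursing on the remaining suffix nums[i:]
def pvCount (k : Int) : List Int → List Int → Int
  | _chosen, [] => 1
  | chosen, num :: rest =>
      let total := pvCount k chosen rest
      if !chosen.contains (num - k) && !chosen.contains (num + k) then
        total + pvCount k (chosen ++ [num]) rest
      else total

def beautifulSubsets_alt (nums : List Int) (k : Int) : Int :=
  pvCount k [] nums - 1

-- ===== PRECONDITION & SPEC =====
def Spec_beautifulSubsets (nums : List Int) (k : Int) (out : Int) : Prop := out = beautifulSubsets_alt nums k
instance (nums : List Int) (k : Int) (out : Int) : Decidable (Spec_beautifulSubsets nums k out) := by unfold Spec_beautifulSubsets; infer_instance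

-- ===== CLAIM (what is proved, stated in full; the proofs are below) =====
def Claim_equal_beautifulSubsets : Prop := ∀ (nums : List Int) (k : Int), Dom_beautifulSubsets nums k → Spec_beautifulSubsets nums k (beautifulSubsets nums k)

-- ===== LEMMAS AND PROOFS =====

theorem pv_getD_append_length {α : Type} (P : List α) (x : α) (ys : List α) (d : α) :
    (P ++ x :: ys).getD P.length d = x := by
  induction P with
  | nil => rfl
  | cons p P _ih => simp

-- characterisation of A's inner index loop
theorem pvStepA_loop (k1 k2 num : Int) (L : List (List Int)) :
    ∀ (P extra : List (List Int)),
    (PySem.List.pyRange (P.length) (P.length + L.length) 1).foldl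
      (fun acc i =>
        let subset := PySem.List.pyGetD acc i []
        if !subset.contains k1 && !subset.contains k2 then acc ++ [subset ++ [num]] else acc)
      (P ++ L ++ extra)
    = P ++ L ++ extra ++
        (L.filter (fun s => !s.contains k1 && !s.contains k2)).map (fun s => s ++ [num]) := by
  induction L with
  | nil =>
      intro P extra
      rw [show ((P.length : Int) + ([] : List (List Int)).length) = (P.length : Int) by simp,
        PySem.List.pyRange_one_eq_nil le_rfl]
      simp
  | cons x L ih =>
      intro P extra
      rw [PySem.List.pyRange_one_cons (by simp)]
      have hget : PySem.List.pyGetD (P ++ (x :: L) ++ extra) (P.length) ([] : List Int) = x := by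
        rw [PySem.List.pyGetD_natCast]
        rw [show P ++ (x :: L) ++ extra = P ++ x :: (L ++ extra) by simp]
        exact pv_getD_append_length P x (L ++ extra) []
      simp only [List.foldl_cons, hget]
      by_cases hx : (!x.contains k1 && !x.contains k2) = true
      · rw [if_pos hx]
        have harr : P ++ (x :: L) ++ extra ++ [x ++ [num]]
            = (P ++ [x]) ++ L ++ (extra ++ [x ++ [num]]) := by simp
        have hrange : ((P.length : Int) + 1) = ((P ++ [x]).length : Int) := by simp
        have hrange2 : ((P.length : Int) + ((x :: L).length : Nat))
            = ((P ++ [x]).length : Int) + (L.length : Nat) := by simp; omega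
        rw [harr, hrange, hrange2, ih (P ++ [x]) (extra ++ [x ++ [num]]),
          List.filter_cons, if_pos hx]
        simp
      · rw [if_neg hx]
        have harr : P ++ (x :: L) ++ extra = (P ++ [x]) ++ L ++ extra := by simp
        have hrange : ((P.length : Int) + 1) = ((P ++ [x]).length : Int) := by simp
        have hrange2 : ((P.length : Int) + ((x :: L).length : Nat))
            = ((P ++ [x]).length : Int) + (L.length : Nat) := by simp; omega
        rw [harr, hrange, hrange2, ih (P ++ [x]) extra,
          List.filter_cons, if_neg hx]

theorem pvStepA_eq (k num : Int) (L : List (List Int)) :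
    pvStepA k L num
      = L ++ (L.filter (fun s => !s.contains (num - k) && !s.contains (num + k))).map
          (fun s => s ++ [num]) := by
  have h := pvStepA_loop (num - k) (num + k) num L [] []
  simpa [pvStepA] using h

theorem pv_sum_map_one {α : Type} (L : List α) :
    (L.map (fun _ => (1 : Int))).sum = (L.length : Int) := by
  induction L with
  | nil => rfl
  | cons x L _ih => simp; omega

theorem pv_sum_map_filter {α : Type} (p : α → Bool) (g : α → Int) (L : List α) :
    ((L.filter p).map g).sum = (L.map (fun s => if p s then g s else 0)).sum := by
  induction L with
  | nil => rfl
  | cons x L ih =>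
      by_cases hx : p x = true
      · simp [hx, ih]
      · simp [hx, ih]

theorem pv_sum_map_add {α : Type} (f g : α → Int) (L : List α) :
    (L.map (fun s => f s + g s)).sum = (L.map f).sum + (L.map g).sum := by
  induction L with
  | nil => rfl
  | cons x L ih => simp [ih]; ring

theorem pvCount_cons (k : Int) (chosen num : _) (rest : List Int) :
    pvCount k chosen (num :: rest)
      = pvCount k chosen rest
        + (if (!chosen.contains (num - k) && !chosen.contains (num + k)) then
             pvCount k (chosen ++ [num]) rest else 0) := by
  cases h : (!chosen.contains (num - k) && !chosen.contains (num + k)) <;>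
    simp only [pvCount, h, if_true, if_false, Bool.false_eq_true, add_zero]

-- main invariant: the length of A's subset list equals the sum of B's counts
theorem pv_fold_count (k : Int) (nums : List Int) :
    ∀ (L : List (List Int)),
    (((nums.foldl (fun s n => pvStepA k s n) L).length : Nat) : Int)
      = (L.map (fun s => pvCount k s nums)).sum := by
  induction nums with
  | nil =>
      intro L
      simp only [List.foldl_nil, pvCount, pv_sum_map_one]
  | cons num rest ih =>
      intro L
      have h1 : (rest.foldl (fun s n => pvStepA k s n) (pvStepA k L num)).length
          = ((pvStepA k L num).map (fun s => pvCount k s rest)).sum := by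
        exact_mod_cast ih (pvStepA k L num)
      rw [List.foldl_cons]
      push_cast [h1]
      rw [pvStepA_eq, List.map_append, List.sum_append, List.map_map]
      have hfil := pv_sum_map_filter
        (fun s => !s.contains (num - k) && !s.contains (num + k))
        (fun s => pvCount k (s ++ [num]) rest) L
      simp only [Function.comp_def]
      rw [hfil]
      have : (L.map (fun s => pvCount k s (num :: rest))).sum
          = (L.map (fun s => pvCount k s rest
              + (if (!s.contains (num - k) && !s.contains (num + k)) then
                   pvCount k (s ++ [num]) rest else 0))).sum := by
        congr 1
        apply List.map_congr_left
        intro s _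
        exact pvCount_cons k s num rest
      rw [this, pv_sum_map_add]

-- ===== VERDICT (by name: the statement is the Claim_ definition above) =====
theorem beautifulSubsets_spec : Claim_equal_beautifulSubsets := by
  intro nums k _
  unfold Spec_beautifulSubsets beautifulSubsets beautifulSubsets_alt
  have h := pv_fold_count k nums [[]]
  simp only [List.map, List.sum_cons, List.sum_nil, add_zero] at h
  show ((List.foldl (fun subsets num => pvStepA k subsets num) [[]] nums).length : Int) - 1
      = pvCount k [] nums - 1
  omega
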